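-- pv_equiv track=rewrite | github.com/Rew93/codevars_task | code_vars_task/the_observed_pin.py | comb_for_7key
-- ===== SOURCE A (Python) =====
-- def comb_for_7key(num):
--     lst = []
--     for a in num[0]:
--         for b in num[1]:
--             for c in num[2]:
--                 for d in num[3]:
--                     for i in num[4]:
--                         for f in num[5]:
--                             for g in num[6]:
--                                 lst.append(a + b + c + d + i + f + g)
--     return sorted(lst)
-- ===== SOURCE B (Python) =====
-- def comb_for_7key(num):
--     # Sort each component once, group equal characters with their counts, and emit the
--     # product directly in lexicographic order (equal results expanded last) - no final sort.
--     groups = []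
--     for s in num[:7]:
--         t = sorted(s)
--         groups.append([(ch, t.count(ch)) for ch in sorted(set(t))])
--     out = [("", 1)]
--     for g in groups:
--         out = [(p + ch, m * k) for (p, m) in out for (ch, k) in g]
--     return [p for (p, m) in out for _ in range(m)]
-- ===== Notes on version B (the rewrite author's own statement) =====
-- stated objective: alternative
-- what changed: Instead of materialising all N concatenations with seven nested loops and then sorting the whole list, B sorts each of the 7 components once, groups equal characters with their multiplicities, emits the grouped product directly in lexicographic order and expands multiplicities at the end - no final sort.
import Mathlib
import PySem

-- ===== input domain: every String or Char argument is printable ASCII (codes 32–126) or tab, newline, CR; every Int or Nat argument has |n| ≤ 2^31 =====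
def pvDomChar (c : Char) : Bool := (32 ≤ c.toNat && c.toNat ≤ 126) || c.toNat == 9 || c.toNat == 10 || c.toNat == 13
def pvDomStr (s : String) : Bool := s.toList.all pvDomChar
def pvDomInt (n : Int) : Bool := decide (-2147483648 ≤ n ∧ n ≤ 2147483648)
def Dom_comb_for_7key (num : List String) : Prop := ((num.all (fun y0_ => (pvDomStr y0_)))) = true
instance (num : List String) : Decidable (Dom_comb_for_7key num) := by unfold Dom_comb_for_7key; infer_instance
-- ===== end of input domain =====

-- B replaces A's "enumerate all 7-char concatenations, then sort" by "sort each component once,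
-- group equal characters with counts, emit the product directly in lexicographic order" (no final sort).

-- ===== PORT A =====
-- literal port: seven nested loops appending a+b+c+d+i+f+g (7 chars, ported as String.ofList),
-- then sorted(lst); num[i] is ported with pyGetD with default "" — an out-of-range access occurs
-- only outside Pre_, where an earlier empty string already makes every loop body dead.
def comb_for_7key (num : List String) : List String :=
  PySem.List.sorted
    ((PySem.List.pyGetD num 0 "").toList.foldl (fun acc a =>
      (PySem.List.pyGetD num 1 "").toList.foldl (fun acc b =>
        (PySem.List.pyGetD num 2 "").toList.foldl (fun acc c =>
          (PySem.List.pyGetD num 3 "").toList.foldl (fun acc d =>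
            (PySem.List.pyGetD num 4 "").toList.foldl (fun acc i =>
              (PySem.List.pyGetD num 5 "").toList.foldl (fun acc f =>
                (PySem.List.pyGetD num 6 "").toList.foldl (fun acc g =>
                  acc ++ [String.ofList [a, b, c, d, i, f, g]]) acc) acc) acc) acc) acc) acc) [])
    (fun x => x) false

-- ===== PORT B =====
-- literal port of Source B; Python strings are built as List Char and turned into String on emission.
def comb_for_7key_alt (num : List String) : List String :=
  let groups := (PySem.List.slice num none (some 7)).map (fun s =>
    let t := PySem.List.sorted s.toList (fun c => c) false
    (PySem.List.sorted (PySem.Set.ofList t) (fun c => c) false).map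
      (fun ch => (ch, (PySem.List.count t ch : Int))))
  let out := groups.foldl
    (fun out g => out.flatMap (fun pm => g.map (fun ck => (pm.1 ++ [ck.1], pm.2 * ck.2))))
    [(([] : List Char), (1 : Int))]
  out.flatMap (fun pm => (PySem.List.pyRange 0 pm.2 1).map (fun _ => String.ofList pm.1))

-- ===== PRECONDITION & SPEC =====
-- Pre_ excludes exactly the inputs where A raises IndexError: fewer than 7 strings and none of
-- the present ones empty (the first empty string ends the loop nest before a missing index is read).
def Pre_comb_for_7key (num : List String) : Prop := 7 ≤ num.length ∨ "" ∈ num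
instance (num : List String) : Decidable (Pre_comb_for_7key num) := by unfold Pre_comb_for_7key; infer_instance
def pvWitness_comb_for_7key : List String := ["12", "3", "4", "5", "6", "7", "89"]
def Spec_comb_for_7key (num : List String) (out : List String) : Prop := out = comb_for_7key_alt num
instance (num : List String) (out : List String) : Decidable (Spec_comb_for_7key num out) := by unfold Spec_comb_for_7key; infer_instance

-- ===== CLAIM (what is proved, stated in full; the proofs are below) =====
def Claim_equal_comb_for_7key : Prop := ∀ (num : List String), Dom_comb_for_7key num → Pre_comb_for_7key num → Spec_comb_for_7key num (comb_for_7key num)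

-- ===== LEMMAS AND PROOFS =====

-- A's loop nest as a structural recursion: all concatenations pre ++ [a,…] in A's emission order.
def nestS : List (List Char) → List Char → List String
  | [], pre => [String.ofList pre]
  | s :: rest, pre => s.flatMap (fun c => nestS rest (pre ++ [c]))

-- B's grouped product as a structural recursion: multiplicity m of the prefix so far.
def nestC : List (List (Char × Int)) → List Char → Int → List String
  | [], pre, m => (PySem.List.pyRange 0 m 1).map (fun _ => String.ofList pre)
  | g :: rest, pre, m => g.flatMap (fun ck => nestC rest (pre ++ [ck.1]) (m * ck.2))

-- B's per-component group: sorted distinct characters with their counts.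
def pvGc (s : List Char) : List (Char × Int) :=
  (PySem.List.sorted (PySem.Set.ofList (PySem.List.sorted s (fun c => c) false)) (fun c => c) false).map
    (fun ch => (ch, (PySem.List.count (PySem.List.sorted s (fun c => c) false) ch : Int)))

lemma A_norm (num : List String) :
    comb_for_7key num = PySem.List.sorted
      (nestS [(PySem.List.pyGetD num 0 "").toList, (PySem.List.pyGetD num 1 "").toList,
              (PySem.List.pyGetD num 2 "").toList, (PySem.List.pyGetD num 3 "").toList,
              (PySem.List.pyGetD num 4 "").toList, (PySem.List.pyGetD num 5 "").toList,
              (PySem.List.pyGetD num 6 "").toList] [])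
      (fun x => x) false := by
  unfold comb_for_7key
  simp only [PySem.List.foldl_append_eq_flatMap]
  simp [nestS]

lemma foldlProd (groups : List (List (Char × Int))) : ∀ (out : List (List Char × Int)),
    (groups.foldl
      (fun out g => out.flatMap (fun pm => g.map (fun ck => (pm.1 ++ [ck.1], pm.2 * ck.2))))
      out).flatMap
        (fun pm => (PySem.List.pyRange 0 pm.2 1).map (fun _ => String.ofList pm.1))
    = out.flatMap (fun pm => nestC groups pm.1 pm.2) := by
  induction groups with
  | nil => intro out; simp [nestC]
  | cons g rest ih =>
    intro out
    simp only [List.foldl_cons, ih]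
    simp [nestC, List.flatMap_assoc, List.flatMap_map]

lemma B_norm (num : List String) :
    comb_for_7key_alt num = nestC (((num.take 7).map String.toList).map pvGc) [] 1 := by
  unfold comb_for_7key_alt
  rw [foldlProd, PySem.List.slice_to num (show (0:Int) ≤ 7 by norm_num)]
  norm_num
  simp [pvGc, Function.comp_def]

lemma coe_flatMap {α β : Type} (l : List α) (f : α → List β) :
    ((l.flatMap f : List β) : Multiset β) = (l.map (fun a => ((f a : List β) : Multiset β))).sum := by
  induction l with
  | nil => simp
  | cons x l ih => simp only [List.flatMap_cons, List.map_cons, List.sum_cons, ← ih, Multiset.coe_add]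

lemma count_flatMap_replicate (u : List Char) (k : Char → Nat) (hu : u.Nodup) (a : Char) :
    List.count a (u.flatMap (fun c => List.replicate (k c) c)) = if a ∈ u then k a else 0 := by
  induction u with
  | nil => simp
  | cons c u ih =>
    simp only [List.nodup_cons] at hu
    by_cases hac : a = c
    · subst hac
      simp [List.count_append, ih hu.2, hu.1]
    · simp [List.count_append, List.count_replicate, hac, ih hu.2, List.mem_cons,
            show ¬ c = a from fun h => hac h.symm]

lemma gc_expand (s : List Char) :
    ((pvGc s).flatMap (fun ck => List.replicate ck.2.toNat ck.1)).Perm s := by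
  unfold pvGc
  rw [List.flatMap_map]
  have hperm := PySem.List.sorted_perm s (fun c => c) false
  have huperm := PySem.List.sorted_perm (PySem.Set.ofList (PySem.List.sorted s (fun c => c) false)) (fun c => c) false
  have hnodup : (PySem.List.sorted (PySem.Set.ofList (PySem.List.sorted s (fun c => c) false)) (fun c => c) false).Nodup :=
    huperm.nodup_iff.mpr (PySem.Set.nodup_ofList _)
  rw [List.perm_iff_count]
  intro a
  have hcnt := count_flatMap_replicate
    (PySem.List.sorted (PySem.Set.ofList (PySem.List.sorted s (fun c => c) false)) (fun c => c) false)
    (fun c => ((PySem.List.count (PySem.List.sorted s (fun c => c) false) c : Int)).toNat) hnodup a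
  rw [hcnt]
  have hmem : a ∈ PySem.List.sorted (PySem.Set.ofList (PySem.List.sorted s (fun c => c) false)) (fun c => c) false ↔ a ∈ s := by
    rw [PySem.List.mem_sorted, PySem.Set.mem_ofList, PySem.List.mem_sorted]
  by_cases ha : a ∈ s
  · simp [hmem, ha, PySem.List.count_eq, hperm.count_eq]
  · simp [hmem, ha, List.count_eq_zero_of_not_mem ha]

lemma sum_flatMap {α M : Type} [AddCommMonoid M] (l : List α) (f : α → List M) :
    (l.flatMap f).sum = (l.map (fun a => (f a).sum)).sum := by
  induction l with
  | nil => simp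
  | cons x l ih => simp [ih]

lemma gc_level (s : List Char) (F : Char → Multiset String) :
    ((pvGc s).map (fun ck => ck.2.toNat • F ck.1)).sum = (s.map F).sum := by
  rw [← List.Perm.sum_eq ((gc_expand s).map F)]
  rw [List.map_flatMap, sum_flatMap]
  simp [List.map_replicate, List.sum_replicate]

lemma nestC_ms (ss : List (List Char)) : ∀ (pre : List Char) (m : Int), 0 ≤ m →
    ((nestC (ss.map pvGc) pre m : List String) : Multiset String)
      = m.toNat • ((nestS ss pre : List String) : Multiset String) := by
  induction ss with
  | nil =>
    intro pre m hm
    simp only [List.map_nil, nestC, nestS]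
    rw [List.map_const', PySem.List.length_pyRange_one]
    simp [← Multiset.coe_replicate, Multiset.nsmul_singleton]
  | cons s ss ih =>
    intro pre m hm
    simp only [List.map_cons, nestC, nestS]
    rw [coe_flatMap, coe_flatMap]
    have hentry : ∀ ck ∈ pvGc s,
        ((nestC (ss.map pvGc) (pre ++ [ck.1]) (m * ck.2) : List String) : Multiset String)
          = m.toNat • (ck.2.toNat • ((nestS ss (pre ++ [ck.1]) : List String) : Multiset String)) := by
      intro ck hck
      obtain ⟨ch, _, rfl⟩ := List.mem_map.mp hck
      have hk : (0:Int) ≤ ((PySem.List.count (PySem.List.sorted s (fun c => c) false) ch : Int)) := by positivity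
      rw [ih _ _ (mul_nonneg hm hk)]
      have : (m * ((PySem.List.count (PySem.List.sorted s (fun c => c) false) ch : Int))).toNat
          = m.toNat * ((PySem.List.count (PySem.List.sorted s (fun c => c) false) ch : Int)).toNat := by
        rcases Int.eq_ofNat_of_zero_le hm with ⟨n, rfl⟩
        rw [← Nat.cast_mul, Int.toNat_natCast, Int.toNat_natCast, Int.toNat_natCast]
      rw [this, mul_smul]
    rw [List.map_congr_left hentry]
    have : (pvGc s).map (fun ck => m.toNat • (ck.2.toNat • ((nestS ss (pre ++ [ck.1]) : List String) : Multiset String)))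
        = ((pvGc s).map (fun ck => ck.2.toNat • ((nestS ss (pre ++ [ck.1]) : List String) : Multiset String))).map
            (fun x => m.toNat • x) := by
      rw [List.map_map]
      rfl
    rw [this, ← List.smul_sum]
    congr 1
    have := gc_level s (fun c => ((nestS ss (pre ++ [c]) : List String) : Multiset String))
    simpa using this

lemma lex_append (c1 c2 : Char) (h : c1 < c2) (w1 w2 : List Char) :
    ∀ pre : List Char, List.Lex (· < ·) (pre ++ c1 :: w1) (pre ++ c2 :: w2)
  | [] => List.Lex.rel h
  | _p :: pre => List.Lex.cons (lex_append c1 c2 h w1 w2 pre)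

lemma ofList_lt (pre : List Char) (c1 c2 : Char) (w1 w2 : List Char) (h : c1 < c2) :
    String.ofList (pre ++ c1 :: w1) < String.ofList (pre ++ c2 :: w2) := by
  rw [String.lt_iff_toList_lt]
  simpa [String.toList_ofList] using lex_append c1 c2 h w1 w2 pre

lemma pairwise_map_const {α : Type} (l : List α) (x : String) :
    (l.map (fun _ => x)).Pairwise (fun a b => a ≤ b) := by
  induction l with
  | nil => simp
  | cons y l ih =>
    exact List.Pairwise.cons (fun b hb => by obtain ⟨_, _, rfl⟩ := List.mem_map.mp hb; exact le_refl _) ih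

lemma nestC_mem : ∀ (gs : List (List (Char × Int))) (pre : List Char) (m : Int) (x : String),
    x ∈ nestC gs pre m → ∃ w, x = String.ofList (pre ++ w) := by
  intro gs
  induction gs with
  | nil =>
    intro pre m x hx
    simp only [nestC, List.mem_map] at hx
    obtain ⟨_, _, rfl⟩ := hx
    exact ⟨[], by simp⟩
  | cons g rest ih =>
    intro pre m x hx
    simp only [nestC, List.mem_flatMap] at hx
    obtain ⟨ck, _, hx⟩ := hx
    obtain ⟨w, rfl⟩ := ih _ _ x hx
    exact ⟨ck.1 :: w, by simp⟩

lemma nestC_pairwise : ∀ (gs : List (List (Char × Int))) (pre : List Char) (m : Int),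
    (∀ g ∈ gs, g.Pairwise (fun a b => a.1 < b.1)) →
    (nestC gs pre m).Pairwise (fun a b => a ≤ b) := by
  intro gs
  induction gs with
  | nil =>
    intro pre m _
    simp only [nestC]
    exact pairwise_map_const _ _
  | cons g rest ih =>
    intro pre m h
    simp only [nestC]
    rw [List.pairwise_flatMap]
    refine ⟨fun ck _ => ih _ _ (fun g' hg' => h g' (List.mem_cons_of_mem _ hg')), ?_⟩
    have hg := h g List.mem_cons_self
    refine hg.imp ?_
    intro a b hab x hx y hy
    obtain ⟨w1, rfl⟩ := nestC_mem _ _ _ _ hx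
    obtain ⟨w2, rfl⟩ := nestC_mem _ _ _ _ hy
    exact le_of_lt (by simpa [List.append_assoc] using ofList_lt pre a.1 b.1 w1 w2 hab)

lemma nestS_nil_of_mem : ∀ (ss : List (List Char)) (pre : List Char), [] ∈ ss → nestS ss pre = [] := by
  intro ss
  induction ss with
  | nil => intro pre h; simp at h
  | cons s rest ih =>
    intro pre h
    rcases List.mem_cons.mp h with h | h
    · rw [nestS, ← h]; simp
    · simp [nestS, ih _ h]

lemma ssB_perm_ssA (num : List String) (hpre : Pre_comb_for_7key num) :
    (nestS ((num.take 7).map String.toList) []).Perm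
      (nestS [(PySem.List.pyGetD num 0 "").toList, (PySem.List.pyGetD num 1 "").toList,
              (PySem.List.pyGetD num 2 "").toList, (PySem.List.pyGetD num 3 "").toList,
              (PySem.List.pyGetD num 4 "").toList, (PySem.List.pyGetD num 5 "").toList,
              (PySem.List.pyGetD num 6 "").toList] []) := by
  by_cases h7 : 7 ≤ num.length
  · have key : (num.take 7).map String.toList
        = [(PySem.List.pyGetD num 0 "").toList, (PySem.List.pyGetD num 1 "").toList,
           (PySem.List.pyGetD num 2 "").toList, (PySem.List.pyGetD num 3 "").toList,
           (PySem.List.pyGetD num 4 "").toList, (PySem.List.pyGetD num 5 "").toList,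
           (PySem.List.pyGetD num 6 "").toList] := by
      have g0 : PySem.List.pyGetD num 0 "" = num[0]'(by omega) := by
        rw [PySem.List.pyGetD_eq_getElem num "" (by norm_num) (by omega)]; rfl
      have g1 : PySem.List.pyGetD num 1 "" = num[1]'(by omega) := by
        rw [PySem.List.pyGetD_eq_getElem num "" (by norm_num) (by omega)]; rfl
      have g2 : PySem.List.pyGetD num 2 "" = num[2]'(by omega) := by
        rw [PySem.List.pyGetD_eq_getElem num "" (by norm_num) (by omega)]; rfl
      have g3 : PySem.List.pyGetD num 3 "" = num[3]'(by omega) := by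
        rw [PySem.List.pyGetD_eq_getElem num "" (by norm_num) (by omega)]; rfl
      have g4 : PySem.List.pyGetD num 4 "" = num[4]'(by omega) := by
        rw [PySem.List.pyGetD_eq_getElem num "" (by norm_num) (by omega)]; rfl
      have g5 : PySem.List.pyGetD num 5 "" = num[5]'(by omega) := by
        rw [PySem.List.pyGetD_eq_getElem num "" (by norm_num) (by omega)]; rfl
      have g6 : PySem.List.pyGetD num 6 "" = num[6]'(by omega) := by
        rw [PySem.List.pyGetD_eq_getElem num "" (by norm_num) (by omega)]; rfl
      apply List.ext_getElem (by simp; omega)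
      intro i h1 h2
      have hi : i < 7 := by simpa using h2
      interval_cases i <;> simp [g0, g1, g2, g3, g4, g5, g6]
    rw [key]
  · have hmem : "" ∈ num := hpre.resolve_left h7
    have hA : ∃ i : Nat, i < 7 ∧ PySem.List.pyGetD num (i : Int) "" = "" := by
      obtain ⟨j, hj, hje⟩ := List.mem_iff_getElem.mp hmem
      exact ⟨j, by omega, by rw [PySem.List.pyGetD_natCast, List.getD_eq_getElem _ _ hj, hje]⟩
    obtain ⟨i, hi7, hie⟩ := hA
    have hAnil : nestS [(PySem.List.pyGetD num 0 "").toList, (PySem.List.pyGetD num 1 "").toList,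
              (PySem.List.pyGetD num 2 "").toList, (PySem.List.pyGetD num 3 "").toList,
              (PySem.List.pyGetD num 4 "").toList, (PySem.List.pyGetD num 5 "").toList,
              (PySem.List.pyGetD num 6 "").toList] [] = [] := by
      apply nestS_nil_of_mem
      interval_cases i <;> simp_all
    have hBnil : nestS ((num.take 7).map String.toList) [] = [] := by
      apply nestS_nil_of_mem
      rw [List.take_of_length_le (by omega)]
      exact List.mem_map.mpr ⟨"", hmem, rfl⟩
    rw [hAnil, hBnil]

-- ===== VERDICT (by name: the statement is the Claim_ definition above) =====
theorem comb_for_7key_spec : Claim_equal_comb_for_7key := by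
  intro num _dom hpre
  unfold Spec_comb_for_7key
  rw [A_norm, B_norm]
  apply PySem.List.sorted_id_eq_of_perm_of_pairwise
  · -- Perm
    have hms := nestC_ms ((num.take 7).map String.toList) [] 1 (by norm_num)
    have hperm1 : (nestC (((num.take 7).map String.toList).map pvGc) [] 1).Perm
        (nestS ((num.take 7).map String.toList) []) := by
      rw [← Multiset.coe_eq_coe]
      simpa using hms
    exact hperm1.trans (ssB_perm_ssA num hpre)
  · -- Pairwise
    apply nestC_pairwise
    intro g hg
    obtain ⟨s, _, rfl⟩ := List.mem_map.mp hg
    unfold pvGc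
    rw [List.pairwise_map]
    simpa using PySem.List.sorted_ofList_pairwise_lt
      (PySem.List.sorted s (fun c => c) false)
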